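-- pv_equiv track=rewrite | github.com/ef-trmd/progetto_tesi | Bo_config/genera_configurazioni.py | ha_vicini
-- ===== SOURCE A (Python) =====
-- L = 6  # dimensione della griglia: 6x6 triangoli
--
-- primi_vicini = [(-1, -1), (0, -1), (1, 0), (-1, 0), (0, 1), (1, 1)]
--
-- def modulo(i):
--     """
--     Funzione modulo: usata nel calcolo dei primi vicini per tenere conto delle PBC
--     Input:
--         i (intero): indice di posizione, assume valori nell'intervallo [-1,6]
--     Parametri:
--         L (intero): dimensione della griglia
--     Returns:
--         intero: sostituisce i valori di input i=-1 e i=6 con 6 -> 0 e -1 -> 5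
--     """
--     return i % L
--
-- def ha_vicini(combinazione):
--     """
--     Verifica se nella combinazione in input ci sono buchi vicini (inclusi vicini con PBC)
--     Input:
--         combinazione (tupla): contiene le coordinate (i,j) dei buchi
--     Returns:
--         bool: restituisce True se trova due buchi vicini, False se non li trova
--     """
--
--     #per ciascun buco, controllo se uno o più dei suoi primi vicini si trova nella combinazione
--     for i, j in combinazione:
--         for di, dj in primi_vicini:
--             ni = modulo(i + di)
--             nj = modulo(j + dj)
--             if (ni, nj) in combinazione:
--                 return True
--     return False
-- ===== SOURCE B (Python) =====
-- L = 6
--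
-- primi_vicini = [(-1, -1), (0, -1), (1, 0), (-1, 0), (0, 1), (1, 1)]
--
-- def ha_vicini(combinazione):
--     # Two-phase, no early exit: build the set of holes and the set of all
--     # PBC neighbors of holes, then test whether the two sets intersect.
--     holes = set(combinazione)
--     vicini = {((i + di) % L, (j + dj) % L)
--               for (i, j) in combinazione
--               for (di, dj) in primi_vicini}
--     return bool(holes & vicini)
-- ===== Notes on version B (the rewrite author's own statement) =====
-- stated objective: faster
-- what changed: Replaces the early-return nested scan with list membership by a two-phase shape: build the hole set and the set of all PBC neighbors once, then return whether the two sets intersect.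
import Mathlib
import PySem

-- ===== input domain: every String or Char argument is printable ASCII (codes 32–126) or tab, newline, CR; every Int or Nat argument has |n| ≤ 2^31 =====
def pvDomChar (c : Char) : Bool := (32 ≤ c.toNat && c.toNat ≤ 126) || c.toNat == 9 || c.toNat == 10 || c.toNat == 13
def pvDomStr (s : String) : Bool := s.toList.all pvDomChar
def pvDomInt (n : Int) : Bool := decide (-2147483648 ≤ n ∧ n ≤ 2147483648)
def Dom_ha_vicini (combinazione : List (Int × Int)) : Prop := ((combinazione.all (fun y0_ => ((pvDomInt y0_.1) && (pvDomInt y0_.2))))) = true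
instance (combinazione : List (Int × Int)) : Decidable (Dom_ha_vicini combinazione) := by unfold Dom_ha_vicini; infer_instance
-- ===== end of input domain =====

-- B replaces A's early-return nested membership scan by building the hole set and the
-- set of all PBC neighbors and testing their intersection (alternative decomposition).

-- ===== PORT A =====
def pvPrimiVicini : List (Int × Int) := [(-1, -1), (0, -1), (1, 0), (-1, 0), (0, 1), (1, 1)]

def pvModulo (i : Int) : Int := PySem.Int.mod i 6

def ha_vicini (combinazione : List (Int × Int)) : Bool :=
  combinazione.any (fun p =>
    pvPrimiVicini.any (fun d =>
      combinazione.contains (pvModulo (p.1 + d.1), pvModulo (p.2 + d.2))))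

-- ===== PORT B =====
def ha_vicini_alt (combinazione : List (Int × Int)) : Bool :=
  let holes : PySem.Set (Int × Int) := PySem.Set.ofList combinazione
  let vicini : PySem.Set (Int × Int) :=
    PySem.Set.ofList (combinazione.flatMap (fun p =>
      pvPrimiVicini.map (fun d => (pvModulo (p.1 + d.1), pvModulo (p.2 + d.2)))))
  !(PySem.Set.inter holes vicini).isEmpty

-- ===== PRECONDITION & SPEC =====
def Spec_ha_vicini (combinazione : List (Int × Int)) (out : Bool) : Prop := out = ha_vicini_alt combinazione
instance (combinazione : List (Int × Int)) (out : Bool) : Decidable (Spec_ha_vicini combinazione out) := by unfold Spec_ha_vicini; infer_instance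

-- ===== CLAIM (what is proved, stated in full; the proofs are below) =====
def Claim_equal_ha_vicini : Prop := ∀ (combinazione : List (Int × Int)), Dom_ha_vicini combinazione → Spec_ha_vicini combinazione (ha_vicini combinazione)

-- ===== LEMMAS AND PROOFS =====

theorem ha_vicini_iff (c : List (Int × Int)) :
    ha_vicini c = ha_vicini_alt c := by
  rw [Bool.eq_iff_iff]
  simp [ha_vicini, ha_vicini_alt, List.eq_nil_iff_forall_not_mem,
    PySem.Set.mem_inter, PySem.Set.mem_ofList]
  constructor
  · rintro ⟨a, b, hab, da, db, hd, hm⟩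
    exact ⟨a, b, da, db, hm, hab, hd⟩
  · rintro ⟨a, b, da, db, hm, hab, hd⟩
    exact ⟨a, b, hab, da, db, hd, hm⟩

-- ===== VERDICT (by name: the statement is the Claim_ definition above) =====
theorem ha_vicini_spec : Claim_equal_ha_vicini := by
  intro c _
  unfold Spec_ha_vicini
  exact ha_vicini_iff c
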